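-- pv_equiv track=rewrite | github.com/wolfgangB33r/kaggle-kernels | toxic-comments/script.py | prepare_text
-- ===== SOURCE A (Python) =====
-- def prepare_text(raw_text):
-- 	# https://www.fastcompany.com/3026596/140-characters-of-fck-sht-and-ss-how-we-swear-on-twitter
-- 	wAliases = {
-- 		'f***' : 'fuck',
-- 		'f**k' : 'fuck',
-- 		'f*ck' : 'fuck',
-- 		's**t' : 'shit',
-- 		'sh!t' : 'shit'
-- 	}
--
-- 	t = raw_text.lower()
-- 	for key, val in wAliases.items():
-- 		t = t.replace(key, val)
-- 	return t
-- ===== SOURCE B (Python) =====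
-- def prepare_text(raw_text):
-- 	# single left-to-right scan: at each position try the 4-char chunk against the alias table
-- 	wAliases = {
-- 		'f***' : 'fuck',
-- 		'f**k' : 'fuck',
-- 		'f*ck' : 'fuck',
-- 		's**t' : 'shit',
-- 		'sh!t' : 'shit'
-- 	}
-- 	t = raw_text.lower()
-- 	out = []
-- 	i = 0
-- 	n = len(t)
-- 	while i < n:
-- 		chunk = t[i:i+4]
-- 		if chunk in wAliases:
-- 			out.append(wAliases[chunk])
-- 			i += 4
-- 		else:
-- 			out.append(t[i])
-- 			i += 1
-- 	return ''.join(out)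
-- ===== Notes on version B (the rewrite author's own statement) =====
-- stated objective: alternative
-- what changed: A lowercases and then makes five separate full-string .replace passes, one per alias; B lowercases and does a single left-to-right scan that looks each 4-character chunk up in the alias dict, emitting the replacement and jumping 4 on a hit.
import Mathlib
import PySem

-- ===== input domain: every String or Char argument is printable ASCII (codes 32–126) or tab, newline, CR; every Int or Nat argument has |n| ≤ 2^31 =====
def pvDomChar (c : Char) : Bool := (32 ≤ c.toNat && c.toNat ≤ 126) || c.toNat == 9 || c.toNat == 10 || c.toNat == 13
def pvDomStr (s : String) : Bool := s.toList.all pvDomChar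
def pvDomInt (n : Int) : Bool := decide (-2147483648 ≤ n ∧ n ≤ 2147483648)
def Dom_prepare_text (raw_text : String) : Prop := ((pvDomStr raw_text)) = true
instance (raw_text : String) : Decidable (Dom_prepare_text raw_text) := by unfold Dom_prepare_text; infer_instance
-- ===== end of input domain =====

-- B replaces A's five sequential full-string .replace passes by ONE left-to-right scan that looks each
-- 4-char chunk up in the alias table (alternative decomposition, same exact output; no speed claim).

-- ===== PORT A =====
def prepare_text (raw_text : String) : String :=
  -- wAliases = { 'f***':'fuck', 'f**k':'fuck', 'f*ck':'fuck', 's**t':'shit', 'sh!t':'shit' }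
  let t := PySem.Str.lower raw_text
  let t := PySem.Str.replace t "f***" "fuck"
  let t := PySem.Str.replace t "f**k" "fuck"
  let t := PySem.Str.replace t "f*ck" "fuck"
  let t := PySem.Str.replace t "s**t" "shit"
  let t := PySem.Str.replace t "sh!t" "shit"
  t

-- ===== PORT B =====
-- the alias dict of Source B (String keys/values as char lists, insertion order kept)
def pvAliases : PySem.Dict (List Char) (List Char) :=
  PySem.Dict.mk
    [ (['f','*','*','*'], ['f','u','c','k'])
    , (['f','*','*','k'], ['f','u','c','k'])
    , (['f','*','c','k'], ['f','u','c','k'])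
    , (['s','*','*','t'], ['s','h','i','t'])
    , (['s','h','!','t'], ['s','h','i','t']) ]

-- Source B's while-loop: chunk = t[i:i+4]; emit the alias and jump 4, else emit t[i] and step 1
def prepareScan (l : List Char) : List Char :=
  match l with
  | [] => []
  | c :: t =>
    match pvAliases.get? ((c :: t).take 4) with
    | some v => v ++ prepareScan ((c :: t).drop 4)
    | none => c :: prepareScan t
termination_by l.length
decreasing_by all_goals simp

def prepare_text_alt (raw_text : String) : String :=
  let t := PySem.Str.lower raw_text
  String.ofList (prepareScan t.toList)

-- ===== PRECONDITION & SPEC =====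
def Spec_prepare_text (raw_text : String) (out : String) : Prop := out = prepare_text_alt raw_text
instance (raw_text : String) (out : String) : Decidable (Spec_prepare_text raw_text out) := by unfold Spec_prepare_text; infer_instance

-- ===== CLAIM (what is proved, stated in full; the proofs are below) =====
def Claim_equal_prepare_text : Prop := ∀ (raw_text : String), Dom_prepare_text raw_text → Spec_prepare_text raw_text (prepare_text raw_text)

-- ===== LEMMAS AND PROOFS =====

-- one single-pattern replacement pass (the semantics of s.replace(p0::pr, val) for a nonempty pattern)
def replOne (p0 : Char) (pr val : List Char) : List Char → List Char
  | [] => []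
  | c :: t =>
    if (p0 :: pr).isPrefixOf (c :: t) then val ++ replOne p0 pr val (t.drop pr.length)
    else c :: replOne p0 pr val t
termination_by l => l.length
decreasing_by all_goals simp

lemma replace_go_eq (p0 : Char) (pr val : List Char) :
    ∀ (fuel : Nat) (l acc : List Char), l.length ≤ fuel →
      PySem.Chars.replace.go (p0 :: pr) val fuel l acc = acc.reverse ++ replOne p0 pr val l := by
  intro fuel
  induction fuel with
  | zero =>
    intro l acc hl
    have : l = [] := List.length_eq_zero_iff.mp (Nat.le_zero.mp hl)
    subst this
    rw [PySem.Chars.replace.go.eq_def, replOne]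
    try simp
  | succ n ih =>
    intro l acc hl
    cases l with
    | nil => rw [PySem.Chars.replace.go.eq_def, replOne]; try simp
    | cons c t =>
      rw [PySem.Chars.replace.go.eq_def, replOne]
      by_cases hpre : (p0 :: pr).isPrefixOf (c :: t) = true
      · simp only [hpre, if_true]
        rw [show List.drop (p0 :: pr).length (c :: t) = List.drop pr.length t by simp]
        rw [ih (t.drop pr.length) (val.reverse ++ acc)
              (by simp at hl ⊢; omega)]
        simp
      · simp only [hpre]
        simp only [Bool.false_eq_true, if_false]
        rw [ih t (c :: acc) (by simp at hl ⊢; omega)]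
        simp

lemma replace_eq (p0 : Char) (pr val l : List Char) :
    PySem.Chars.replace l (p0 :: pr) val = replOne p0 pr val l := by
  rw [PySem.Chars.replace]
  simp only [List.isEmpty_cons, Bool.false_eq_true, if_false]
  rw [replace_go_eq p0 pr val l.length l [] le_rfl]
  simp

-- a pass steps over any char that is not the pattern's first char
lemma pass_char (p0 : Char) (pr val : List Char) (c : Char) (t : List Char) (h : c ≠ p0) :
    replOne p0 pr val (c :: t) = c :: replOne p0 pr val t := by
  rw [replOne]
  have : (p0 == c) = false := by simp [beq_eq_false_iff_ne]; exact fun e => h e.symm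
  simp [List.isPrefixOf, this]

-- a pass steps over a 4-char block whose head fails the pattern test and whose tail chars differ from the pattern head
lemma pass4 (p0 : Char) (pr val : List Char) (a b c d : Char) (X : List Char)
    (h : (p0 :: pr).isPrefixOf (a :: b :: c :: d :: X) = false)
    (hb : b ≠ p0) (hc : c ≠ p0) (hd : d ≠ p0) :
    replOne p0 pr val (a :: b :: c :: d :: X) = a :: b :: c :: d :: replOne p0 pr val X := by
  rw [replOne, if_neg (by simp [h]), pass_char _ _ _ _ _ hb, pass_char _ _ _ _ _ hc,
      pass_char _ _ _ _ _ hd]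

-- a prefix made of chars other than 'f'/'s' survives a pass backwards (replacements start with 'f'/'s')
lemma prefix_reflect (p0 : Char) (pr vr : List Char) (v0 : Char) (hv : v0 = 'f' ∨ v0 = 's')
    (p : List Char) (hp : ∀ c ∈ p, c ≠ 'f' ∧ c ≠ 's') :
    ∀ t : List Char, p <+: replOne p0 pr (v0 :: vr) t → p <+: t := by
  have H : ∀ (n : Nat) (q t : List Char), t.length ≤ n → (∀ c ∈ q, c ≠ 'f' ∧ c ≠ 's') →
      (q <+: replOne p0 pr (v0 :: vr) t → q <+: t) := by
    intro n
    induction n with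
    | zero =>
      intro q t ht _ h
      have : t = [] := List.length_eq_zero_iff.mp (Nat.le_zero.mp ht)
      subst this
      rwa [replOne] at h
    | succ n ih =>
      intro q t ht hq h
      cases t with
      | nil => rwa [replOne] at h
      | cons c t' =>
        rw [replOne] at h
        by_cases hpre : (p0 :: pr).isPrefixOf (c :: t') = true
        · rw [if_pos hpre] at h
          cases q with
          | nil => exact List.nil_prefix
          | cons x xs =>
            exfalso
            have hx : v0 = x := by
              rcases h with ⟨r, hr⟩
              simpa using congrArg (fun xs => List.head? xs) hr.symm
            rcases hq x (by simp) with ⟨hf, hs⟩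
            rcases hv with h' | h' <;> subst h'
            · exact hf hx.symm
            · exact hs hx.symm
        · rw [if_neg hpre] at h
          cases q with
          | nil => exact List.nil_prefix
          | cons x xs =>
            rcases List.cons_prefix_cons.mp h with ⟨rfl, hxs⟩
            have hxs' : xs <+: t' :=
              ih xs t' (by simp at ht; omega) (fun y hy => hq y (by simp [hy])) hxs
            exact List.cons_prefix_cons.mpr ⟨rfl, hxs'⟩
  exact fun t => H t.length p t le_rfl hp

-- a pass consumes its own 4-char pattern and emits the replacement
lemma hit (p0 a b c v0 v1 v2 v3 : Char) (X : List Char) :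
    replOne p0 [a, b, c] [v0, v1, v2, v3] (p0 :: a :: b :: c :: X) =
      v0 :: v1 :: v2 :: v3 :: replOne p0 [a, b, c] [v0, v1, v2, v3] X := by
  rw [replOne, if_pos (by simp [List.isPrefixOf])]
  simp

-- the five passes in A's order
def pvComp (l : List Char) : List Char :=
  replOne 's' ['h','!','t'] ['s','h','i','t']
    (replOne 's' ['*','*','t'] ['s','h','i','t']
      (replOne 'f' ['*','c','k'] ['f','u','c','k']
        (replOne 'f' ['*','*','k'] ['f','u','c','k']
          (replOne 'f' ['*','*','*'] ['f','u','c','k'] l))))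

lemma get?_aliases (l : List Char) :
    pvAliases.get? (l.take 4) =
      if ['f','*','*','*'].isPrefixOf l then some ['f','u','c','k']
      else if ['f','*','*','k'].isPrefixOf l then some ['f','u','c','k']
      else if ['f','*','c','k'].isPrefixOf l then some ['f','u','c','k']
      else if ['s','*','*','t'].isPrefixOf l then some ['s','h','i','t']
      else if ['s','h','!','t'].isPrefixOf l then some ['s','h','i','t']
      else none := by
  have h4 : ∀ (p : List Char), p.length = 4 → ((p == l.take 4) = true ↔ p.isPrefixOf l = true) := by
    intro p hp
    rw [beq_iff_eq, List.isPrefixOf_iff_prefix, List.prefix_iff_eq_take, ← hp]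
  simp only [pvAliases, PySem.Dict.get?_mk_cons]
  by_cases h1 : (['f','*','*','*'] : List Char).isPrefixOf l = true
  · rw [if_pos ((h4 _ rfl).mpr h1), if_pos h1]
  · rw [if_neg (fun hh => h1 ((h4 _ rfl).mp hh)), if_neg h1]
    by_cases h2 : (['f','*','*','k'] : List Char).isPrefixOf l = true
    · rw [if_pos ((h4 _ rfl).mpr h2), if_pos h2]
    · rw [if_neg (fun hh => h2 ((h4 _ rfl).mp hh)), if_neg h2]
      by_cases h3 : (['f','*','c','k'] : List Char).isPrefixOf l = true
      · rw [if_pos ((h4 _ rfl).mpr h3), if_pos h3]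
      · rw [if_neg (fun hh => h3 ((h4 _ rfl).mp hh)), if_neg h3]
        by_cases h5 : (['s','*','*','t'] : List Char).isPrefixOf l = true
        · rw [if_pos ((h4 _ rfl).mpr h5), if_pos h5]
        · rw [if_neg (fun hh => h5 ((h4 _ rfl).mp hh)), if_neg h5]
          by_cases h6 : (['s','h','!','t'] : List Char).isPrefixOf l = true
          · rw [if_pos ((h4 _ rfl).mpr h6), if_pos h6]
          · rw [if_neg (fun hh => h6 ((h4 _ rfl).mp hh)), if_neg h6]
            rfl

set_option maxRecDepth 4096 in
lemma comp_eq_scan : ∀ l : List Char, pvComp l = prepareScan l := by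
  intro l
  induction l using prepareScan.induct with
  | case1 => simp [pvComp, replOne, prepareScan]
  | case2 c t v h IH =>
    have h0 := h
    have hscan : prepareScan (c :: t) = v ++ prepareScan ((c :: t).drop 4) := by
      rw [prepareScan, h0]
    rw [hscan]
    rw [get?_aliases] at h
    split_ifs at h with h1 h2 h3 h4 h5
    · -- key f***
      injection h with h; subst h
      rcases List.isPrefixOf_iff_prefix.mp h1 with ⟨rest, hrest⟩
      simp only [List.cons_append, List.nil_append] at hrest
      rw [← hrest] at IH ⊢
      simp only [List.drop_succ_cons, List.drop_zero] at IH ⊢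
      have key : pvComp (['f','*','*','*'] ++ rest) = ['f','u','c','k'] ++ pvComp rest := by
        simp only [List.cons_append, List.nil_append]
        unfold pvComp
        rw [hit 'f' '*' '*' '*' 'f' 'u' 'c' 'k' rest, pass4 'f' ['*','*','k'] ['f','u','c','k'] 'f' 'u' 'c' 'k' _ (by simp [List.isPrefixOf]) (by simp) (by simp) (by simp), pass4 'f' ['*','c','k'] ['f','u','c','k'] 'f' 'u' 'c' 'k' _ (by simp [List.isPrefixOf]) (by simp) (by simp) (by simp), pass4 's' ['*','*','t'] ['s','h','i','t'] 'f' 'u' 'c' 'k' _ (by simp [List.isPrefixOf]) (by simp) (by simp) (by simp), pass4 's' ['h','!','t'] ['s','h','i','t'] 'f' 'u' 'c' 'k' _ (by simp [List.isPrefixOf]) (by simp) (by simp) (by simp)]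
      simp only [List.cons_append, List.nil_append] at key
      rw [key, IH]; rfl
    · -- key f**k
      injection h with h; subst h
      rcases List.isPrefixOf_iff_prefix.mp h2 with ⟨rest, hrest⟩
      simp only [List.cons_append, List.nil_append] at hrest
      rw [← hrest] at IH ⊢
      simp only [List.drop_succ_cons, List.drop_zero] at IH ⊢
      have key : pvComp (['f','*','*','k'] ++ rest) = ['f','u','c','k'] ++ pvComp rest := by
        simp only [List.cons_append, List.nil_append]
        unfold pvComp
        rw [pass4 'f' ['*','*','*'] ['f','u','c','k'] 'f' '*' '*' 'k' rest (by simp [List.isPrefixOf]) (by simp) (by simp) (by simp), hit 'f' '*' '*' 'k' 'f' 'u' 'c' 'k' _, pass4 'f' ['*','c','k'] ['f','u','c','k'] 'f' 'u' 'c' 'k' _ (by simp [List.isPrefixOf]) (by simp) (by simp) (by simp), pass4 's' ['*','*','t'] ['s','h','i','t'] 'f' 'u' 'c' 'k' _ (by simp [List.isPrefixOf]) (by simp) (by simp) (by simp), pass4 's' ['h','!','t'] ['s','h','i','t'] 'f' 'u' 'c' 'k' _ (by simp [List.isPrefixOf]) (by simp) (by simp) (by simp)]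
      simp only [List.cons_append, List.nil_append] at key
      rw [key, IH]; rfl
    · -- key f*ck
      injection h with h; subst h
      rcases List.isPrefixOf_iff_prefix.mp h3 with ⟨rest, hrest⟩
      simp only [List.cons_append, List.nil_append] at hrest
      rw [← hrest] at IH ⊢
      simp only [List.drop_succ_cons, List.drop_zero] at IH ⊢
      have key : pvComp (['f','*','c','k'] ++ rest) = ['f','u','c','k'] ++ pvComp rest := by
        simp only [List.cons_append, List.nil_append]
        unfold pvComp
        rw [pass4 'f' ['*','*','*'] ['f','u','c','k'] 'f' '*' 'c' 'k' rest (by simp [List.isPrefixOf]) (by simp) (by simp) (by simp), pass4 'f' ['*','*','k'] ['f','u','c','k'] 'f' '*' 'c' 'k' _ (by simp [List.isPrefixOf]) (by simp) (by simp) (by simp), hit 'f' '*' 'c' 'k' 'f' 'u' 'c' 'k' _, pass4 's' ['*','*','t'] ['s','h','i','t'] 'f' 'u' 'c' 'k' _ (by simp [List.isPrefixOf]) (by simp) (by simp) (by simp), pass4 's' ['h','!','t'] ['s','h','i','t'] 'f' 'u' 'c' 'k' _ (by simp [List.isPrefixOf]) (by simp) (by simp) (by simp)]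
      simp only [List.cons_append, List.nil_append] at key
      rw [key, IH]; rfl
    · -- key s**t
      injection h with h; subst h
      rcases List.isPrefixOf_iff_prefix.mp h4 with ⟨rest, hrest⟩
      simp only [List.cons_append, List.nil_append] at hrest
      rw [← hrest] at IH ⊢
      simp only [List.drop_succ_cons, List.drop_zero] at IH ⊢
      have key : pvComp (['s','*','*','t'] ++ rest) = ['s','h','i','t'] ++ pvComp rest := by
        simp only [List.cons_append, List.nil_append]
        unfold pvComp
        rw [pass4 'f' ['*','*','*'] ['f','u','c','k'] 's' '*' '*' 't' rest (by simp [List.isPrefixOf]) (by simp) (by simp) (by simp), pass4 'f' ['*','*','k'] ['f','u','c','k'] 's' '*' '*' 't' _ (by simp [List.isPrefixOf]) (by simp) (by simp) (by simp), pass4 'f' ['*','c','k'] ['f','u','c','k'] 's' '*' '*' 't' _ (by simp [List.isPrefixOf]) (by simp) (by simp) (by simp), hit 's' '*' '*' 't' 's' 'h' 'i' 't' _, pass4 's' ['h','!','t'] ['s','h','i','t'] 's' 'h' 'i' 't' _ (by simp [List.isPrefixOf]) (by simp) (by simp) (by simp)]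
      simp only [List.cons_append, List.nil_append] at key
      rw [key, IH]; rfl
    · -- key sh!t
      injection h with h; subst h
      rcases List.isPrefixOf_iff_prefix.mp h5 with ⟨rest, hrest⟩
      simp only [List.cons_append, List.nil_append] at hrest
      rw [← hrest] at IH ⊢
      simp only [List.drop_succ_cons, List.drop_zero] at IH ⊢
      have key : pvComp (['s','h','!','t'] ++ rest) = ['s','h','i','t'] ++ pvComp rest := by
        simp only [List.cons_append, List.nil_append]
        unfold pvComp
        rw [pass4 'f' ['*','*','*'] ['f','u','c','k'] 's' 'h' '!' 't' rest (by simp [List.isPrefixOf]) (by simp) (by simp) (by simp), pass4 'f' ['*','*','k'] ['f','u','c','k'] 's' 'h' '!' 't' _ (by simp [List.isPrefixOf]) (by simp) (by simp) (by simp), pass4 'f' ['*','c','k'] ['f','u','c','k'] 's' 'h' '!' 't' _ (by simp [List.isPrefixOf]) (by simp) (by simp) (by simp), pass4 's' ['*','*','t'] ['s','h','i','t'] 's' 'h' '!' 't' _ (by simp [List.isPrefixOf]) (by simp) (by simp) (by simp), hit 's' 'h' '!' 't' 's' 'h' 'i' 't' _]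
      simp only [List.cons_append, List.nil_append] at key
      rw [key, IH]; rfl
  | case3 c t h IH =>
    have h0 := h
    have hscan : prepareScan (c :: t) = c :: prepareScan t := by
      rw [prepareScan, h0]
    rw [hscan]
    rw [get?_aliases] at h
    split_ifs at h with h1 h2 h3 h4 h5
    by_cases hcf : c = 'f'
    · subst hcf
      have hB2 : ¬((['f','*','*','k'] : List Char).isPrefixOf ('f' :: (replOne 'f' ['*','*','*'] ['f','u','c','k'] t)) = true) := by
        intro hh
        have hh' := (List.cons_prefix_cons.mp (List.isPrefixOf_iff_prefix.mp hh)).2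
        have r := prefix_reflect 'f' ['*','*','*'] ['u','c','k'] 'f' (Or.inl rfl) ['*','*','k'] (by simp) t hh'
        exact h2 (List.isPrefixOf_iff_prefix.mpr (List.cons_prefix_cons.mpr ⟨rfl, r⟩))
      have hB3 : ¬((['f','*','c','k'] : List Char).isPrefixOf ('f' :: (replOne 'f' ['*','*','k'] ['f','u','c','k'] (replOne 'f' ['*','*','*'] ['f','u','c','k'] t))) = true) := by
        intro hh
        have hh' := (List.cons_prefix_cons.mp (List.isPrefixOf_iff_prefix.mp hh)).2
        have r1 := prefix_reflect 'f' ['*','*','k'] ['u','c','k'] 'f' (Or.inl rfl) ['*','c','k'] (by simp) (replOne 'f' ['*','*','*'] ['f','u','c','k'] t) hh'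
        have r2 := prefix_reflect 'f' ['*','*','*'] ['u','c','k'] 'f' (Or.inl rfl) ['*','c','k'] (by simp) t r1
        exact h3 (List.isPrefixOf_iff_prefix.mpr (List.cons_prefix_cons.mpr ⟨rfl, r2⟩))
      have hstep : pvComp ('f' :: t) = 'f' :: pvComp t := by
        unfold pvComp
        rw [show replOne 'f' ['*','*','*'] ['f','u','c','k'] ('f' :: t) = 'f' :: (replOne 'f' ['*','*','*'] ['f','u','c','k'] t) from by rw [replOne, if_neg h1],
            show replOne 'f' ['*','*','k'] ['f','u','c','k'] ('f' :: (replOne 'f' ['*','*','*'] ['f','u','c','k'] t)) = 'f' :: (replOne 'f' ['*','*','k'] ['f','u','c','k'] (replOne 'f' ['*','*','*'] ['f','u','c','k'] t)) from by rw [replOne, if_neg hB2],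
            show replOne 'f' ['*','c','k'] ['f','u','c','k'] ('f' :: (replOne 'f' ['*','*','k'] ['f','u','c','k'] (replOne 'f' ['*','*','*'] ['f','u','c','k'] t))) = 'f' :: (replOne 'f' ['*','c','k'] ['f','u','c','k'] (replOne 'f' ['*','*','k'] ['f','u','c','k'] (replOne 'f' ['*','*','*'] ['f','u','c','k'] t))) from by rw [replOne, if_neg hB3],
            pass_char 's' ['*','*','t'] ['s','h','i','t'] 'f' _ (by simp),
            pass_char 's' ['h','!','t'] ['s','h','i','t'] 'f' _ (by simp)]
      rw [hstep, IH]
    · by_cases hcs : c = 's'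
      · subst hcs
        have hB4 : ¬((['s','*','*','t'] : List Char).isPrefixOf ('s' :: (replOne 'f' ['*','c','k'] ['f','u','c','k'] (replOne 'f' ['*','*','k'] ['f','u','c','k'] (replOne 'f' ['*','*','*'] ['f','u','c','k'] t)))) = true) := by
          intro hh
          have hh' := (List.cons_prefix_cons.mp (List.isPrefixOf_iff_prefix.mp hh)).2
          have r1 := prefix_reflect 'f' ['*','c','k'] ['u','c','k'] 'f' (Or.inl rfl) ['*','*','t'] (by simp) (replOne 'f' ['*','*','k'] ['f','u','c','k'] (replOne 'f' ['*','*','*'] ['f','u','c','k'] t)) hh'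
          have r2 := prefix_reflect 'f' ['*','*','k'] ['u','c','k'] 'f' (Or.inl rfl) ['*','*','t'] (by simp) (replOne 'f' ['*','*','*'] ['f','u','c','k'] t) r1
          have r3 := prefix_reflect 'f' ['*','*','*'] ['u','c','k'] 'f' (Or.inl rfl) ['*','*','t'] (by simp) t r2
          exact h4 (List.isPrefixOf_iff_prefix.mpr (List.cons_prefix_cons.mpr ⟨rfl, r3⟩))
        have hB5 : ¬((['s','h','!','t'] : List Char).isPrefixOf ('s' :: (replOne 's' ['*','*','t'] ['s','h','i','t'] (replOne 'f' ['*','c','k'] ['f','u','c','k'] (replOne 'f' ['*','*','k'] ['f','u','c','k'] (replOne 'f' ['*','*','*'] ['f','u','c','k'] t))))) = true) := by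
          intro hh
          have hh' := (List.cons_prefix_cons.mp (List.isPrefixOf_iff_prefix.mp hh)).2
          have r1 := prefix_reflect 's' ['*','*','t'] ['h','i','t'] 's' (Or.inr rfl) ['h','!','t'] (by simp) (replOne 'f' ['*','c','k'] ['f','u','c','k'] (replOne 'f' ['*','*','k'] ['f','u','c','k'] (replOne 'f' ['*','*','*'] ['f','u','c','k'] t))) hh'
          have r2 := prefix_reflect 'f' ['*','c','k'] ['u','c','k'] 'f' (Or.inl rfl) ['h','!','t'] (by simp) (replOne 'f' ['*','*','k'] ['f','u','c','k'] (replOne 'f' ['*','*','*'] ['f','u','c','k'] t)) r1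
          have r3 := prefix_reflect 'f' ['*','*','k'] ['u','c','k'] 'f' (Or.inl rfl) ['h','!','t'] (by simp) (replOne 'f' ['*','*','*'] ['f','u','c','k'] t) r2
          have r4 := prefix_reflect 'f' ['*','*','*'] ['u','c','k'] 'f' (Or.inl rfl) ['h','!','t'] (by simp) t r3
          exact h5 (List.isPrefixOf_iff_prefix.mpr (List.cons_prefix_cons.mpr ⟨rfl, r4⟩))
        have hstep : pvComp ('s' :: t) = 's' :: pvComp t := by
          unfold pvComp
          rw [pass_char 'f' ['*','*','*'] ['f','u','c','k'] 's' _ (by simp),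
              pass_char 'f' ['*','*','k'] ['f','u','c','k'] 's' _ (by simp),
              pass_char 'f' ['*','c','k'] ['f','u','c','k'] 's' _ (by simp),
              show replOne 's' ['*','*','t'] ['s','h','i','t'] ('s' :: (replOne 'f' ['*','c','k'] ['f','u','c','k'] (replOne 'f' ['*','*','k'] ['f','u','c','k'] (replOne 'f' ['*','*','*'] ['f','u','c','k'] t)))) = 's' :: (replOne 's' ['*','*','t'] ['s','h','i','t'] (replOne 'f' ['*','c','k'] ['f','u','c','k'] (replOne 'f' ['*','*','k'] ['f','u','c','k'] (replOne 'f' ['*','*','*'] ['f','u','c','k'] t)))) from by rw [replOne, if_neg hB4],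
              show replOne 's' ['h','!','t'] ['s','h','i','t'] ('s' :: (replOne 's' ['*','*','t'] ['s','h','i','t'] (replOne 'f' ['*','c','k'] ['f','u','c','k'] (replOne 'f' ['*','*','k'] ['f','u','c','k'] (replOne 'f' ['*','*','*'] ['f','u','c','k'] t))))) = 's' :: replOne 's' ['h','!','t'] ['s','h','i','t'] (replOne 's' ['*','*','t'] ['s','h','i','t'] (replOne 'f' ['*','c','k'] ['f','u','c','k'] (replOne 'f' ['*','*','k'] ['f','u','c','k'] (replOne 'f' ['*','*','*'] ['f','u','c','k'] t)))) from by rw [replOne, if_neg hB5]]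
        rw [hstep, IH]
      · have hstep : pvComp (c :: t) = c :: pvComp t := by
          unfold pvComp
          rw [pass_char 'f' ['*','*','*'] ['f','u','c','k'] c _ hcf,
              pass_char 'f' ['*','*','k'] ['f','u','c','k'] c _ hcf,
              pass_char 'f' ['*','c','k'] ['f','u','c','k'] c _ hcf,
              pass_char 's' ['*','*','t'] ['s','h','i','t'] c _ hcs,
              pass_char 's' ['h','!','t'] ['s','h','i','t'] c _ hcs]
        rw [hstep, IH]

-- ===== VERDICT (by name: the statement is the Claim_ definition above) =====
lemma ports_toList (raw : String) :
    (prepare_text raw).toList = (prepare_text_alt raw).toList := by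
  have h := comp_eq_scan (PySem.Str.lower raw).toList
  unfold pvComp at h
  simp only [prepare_text, prepare_text_alt, PySem.Str.toList_replace, String.toList_ofList]
  rw [show ("f***" : String).toList = ['f','*','*','*'] from rfl,
      show ("f**k" : String).toList = ['f','*','*','k'] from rfl,
      show ("f*ck" : String).toList = ['f','*','c','k'] from rfl,
      show ("s**t" : String).toList = ['s','*','*','t'] from rfl,
      show ("sh!t" : String).toList = ['s','h','!','t'] from rfl,
      show ("fuck" : String).toList = ['f','u','c','k'] from rfl,
      show ("shit" : String).toList = ['s','h','i','t'] from rfl]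
  simp only [replace_eq]
  exact h

-- ===== VERDICT (by name: the statement is the Claim_ definition above) =====
theorem prepare_text_spec : Claim_equal_prepare_text := by
  intro raw _
  show prepare_text raw = prepare_text_alt raw
  rw [← String.ofList_toList (s := prepare_text raw), ports_toList raw, String.ofList_toList]
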